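-- pv_equiv track=rewrite | github.com/sueszli/vector-database-benchmark | dataset/python-mutated/universal.py | sparse_table_parse
-- ===== SOURCE A (Python) =====
-- from typing import Iterable, List, Dict
--
-- def sparse_table_parse(data: Iterable[str], delim: str='\u2063') -> List[Dict]:
--     if False:
--         i = 10
--         return i + 15
--     "\n    Parse tables with missing column data or with spaces in column data.\n    Blank cells are converted to None in the resulting dictionary. Data\n    elements must line up within column boundaries.\n\n    Example Table:\n\n        col_1        col_2     col_3     col_4         col_5\n        apple        orange              fuzzy peach   my favorite fruits\n        green beans            celery    spinach       my favorite veggies\n        chicken      beef                brown eggs    my favorite proteins\n\n        [{'col_1': 'apple', 'col_2': 'orange', 'col_3': None, 'col_4':\n        'fuzzy peach', 'col_5': 'my favorite fruits'}, {'col_1':\n        'green beans', 'col_2': None, 'col_3': 'celery', 'col_4': 'spinach',\n        'col_5': 'my favorite veggies'}, {'col_1': 'chicken', 'col_2':\n        'beef', 'col_3': None, 'col_4': 'brown eggs', 'col_5':\n        'my favorite proteins'}]\n\n    Parameters:\n\n        data:   (iter)   An iterable of string lines (e.g. str.splitlines())\n                         Item 0 must be the header row. Any spaces in header\n                         names should be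 changed to underscore '_'. You\n                         should also ensure headers are lowercase by using\n                         .lower(). Do not change the position of header\n                         names as the positions are used to find the data.\n\n                         Also, ensure there are no blank line items.\n\n        delim:  (string) Delimiter to use. By default `u\\2063`\n                         (invisible separator) is used since it is unlikely\n                         to ever be seen in terminal output. You can change\n                         this for troubleshooting purposes or if there is a\n                         delimiter conflict with your data.\n\n    Returns:\n\n        List of Dictionaries\n    "
--     data = list(data)
--     max_len = max([len(x) for x in data])
--     new_data = []
--     for line in data:
--         new_data.append(line + ' ' * (max_len - len(line)))
--     data = new_data
--     output: List = []
--     header_text: str = data.pop(0)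
--     header_text = header_text + ' '
--     header_list: List = header_text.split()
--     header_search = [header_list[0]]
--     for h in header_list[1:]:
--         header_search.append(' ' + h + ' ')
--     header_spec_list = []
--     for (i, column) in enumerate(header_list[0:len(header_list) - 1]):
--         header_spec = {'name': column, 'end': header_text.find(header_search[i + 1])}
--         header_spec_list.append(header_spec)
--     if data:
--         for entry in data:
--             output_line = {}
--             for col in reversed(header_list):
--                 for h_spec in header_spec_list:
--                     if h_spec['name'] == col:
--                         h_end = h_spec['end']
--                         while h_end > 0 and (not entry[h_end].isspace()):
--                             h_end -= 1
--                         entry = entry[:h_end] + delim + entry[h_end + 1:]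
--             entry_list = entry.split(delim, maxsplit=len(header_list) - 1)
--             clean_entry_list = []
--             for col in entry_list:
--                 clean_entry = col.strip()
--                 if clean_entry == '':
--                     clean_entry = None
--                 clean_entry_list.append(clean_entry)
--             output_line = dict(zip(header_list, clean_entry_list))
--             output.append(output_line)
--     return output
-- ===== SOURCE B (Python) =====
-- from typing import Iterable, List, Dict
--
-- def sparse_table_parse(data: Iterable[str], delim: str='\u2063') -> List[Dict]:
--     """Cut-position re-implementation: instead of splicing a delimiter into each
--     line and splitting on it, collect the (deduplicated) column cut indices into
--     a set and slice each padded row at those positions."""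
--     data = list(data)
--     max_len = max(len(x) for x in data)
--     lines = [x.ljust(max_len) for x in data]
--     header_text = lines[0] + ' '
--     first, *rest_headers = header_text.split()
--     header_list = [first] + rest_headers
--     ends = [header_text.find(' ' + h + ' ') for h in rest_headers]
--     output = []
--     for entry in lines[1:]:
--         cuts = set()
--         for e in reversed(ends):
--             while e > 0 and (e in cuts or not entry[e].isspace()):
--                 e -= 1
--             cuts.add(e)
--         fields = []
--         prev = 0
--         for c in sorted(cuts):
--             fields.append(entry[prev:c])
--             prev = c + 1
--         fields.append(entry[prev:])
--         row = {}
--         for name, f in zip(header_list, fields):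
--             f = f.strip()
--             row[name] = f if f else None
--         output.append(row)
--     return output
-- ===== Notes on version B (the rewrite author's own statement) =====
-- stated objective: alternative
-- what changed: B collects the deduplicated column cut indices into a set and slices each padded row at those positions, instead of splicing a delimiter character into the row string and splitting on it with maxsplit.
-- outside the precondition, e.g. on sparse_table_parse(['ab cd', ' a'], ' '): A returns [{'ab': None, 'cd': 'a'}], B returns [{'ab': 'a', 'cd': None}]; on sparse_table_parse(['x x', ''], '#'): A returns [{'x': '#'}], B returns [{'x': None}]
import Mathlib
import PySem

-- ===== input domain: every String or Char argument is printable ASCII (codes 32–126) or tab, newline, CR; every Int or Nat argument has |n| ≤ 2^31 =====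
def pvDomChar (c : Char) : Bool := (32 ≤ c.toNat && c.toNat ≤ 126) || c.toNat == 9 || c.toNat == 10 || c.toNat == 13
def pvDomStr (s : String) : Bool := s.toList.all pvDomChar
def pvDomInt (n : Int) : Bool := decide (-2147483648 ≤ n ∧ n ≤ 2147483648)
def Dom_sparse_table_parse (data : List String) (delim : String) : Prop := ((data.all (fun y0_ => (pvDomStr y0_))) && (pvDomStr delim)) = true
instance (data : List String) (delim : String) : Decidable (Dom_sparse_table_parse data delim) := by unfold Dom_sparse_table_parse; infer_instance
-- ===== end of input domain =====

-- B replaces A's delimiter-splicing + str.split mechanism by collecting the deduplicated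
-- column cut indices into a set and slicing each padded row at those positions (objective: alternative).


-- ===== PORT A =====
-- while h_end > 0 and (not entry[h_end].isspace()): h_end -= 1
-- (if entry[h_end] were out of range Python would raise IndexError; the `none` branch is unreachable under Pre_)
def pvWalkA (entry : List Char) (h : Int) : Int :=
  if _hpos : 0 < h then
    match PySem.List.pyGet? entry h with
    | some ch => if PySem.Chars.isspace ch then h else pvWalkA entry (h - 1)
    | none => h
  else h
termination_by h.toNat
decreasing_by omega

-- entry = entry[:h_end] + delim + entry[h_end+1:]
def pvSpliceA (delim : List Char) (entry : List Char) (h : Int) : List Char :=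
  PySem.List.slice entry none (some h) ++ delim ++ PySem.List.slice entry (some (h + 1)) none

def sparse_table_parse (data : List String) (delim : String) : List (List (String × Option String)) :=
  let ls := data.map String.toList
  match PySem.List.max? (ls.map (·.length)) id with
  | none => []  -- Python: max([]) raises ValueError (excluded by Pre_)
  | some maxLen =>
    let padded := ls.map (fun l => l ++ List.replicate (maxLen - l.length) ' ')
    match padded with
    | [] => []  -- unreachable (padded nonempty whenever max? succeeded)
    | header :: rest =>
      let ht := header ++ [' ']
      let hlist := PySem.Chars.split₀ ht
      match hlist with
      | [] => []  -- Python: header_list[0] raises IndexError (excluded by Pre_)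
      | h0 :: htail =>
        let hsearch := [h0] ++ htail.map (fun h => ' ' :: h ++ [' '])
        let specs := (List.zip (hlist.take (hlist.length - 1)) (hsearch.drop 1)).map
          (fun p => (p.1, PySem.Chars.find ht p.2))
        rest.map (fun entry0 =>
          let entry := hlist.reverse.foldl (fun e col =>
            specs.foldl (fun e sp =>
              if sp.1 = col then pvSpliceA delim.toList e (pvWalkA e sp.2) else e) e) entry0
          let entry_list := (PySem.Chars.splitMax? entry delim.toList ((hlist.length : Int) - 1)).getD []
          let clean := entry_list.map (fun cl =>
            let t := PySem.Chars.strip cl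
            if t = [] then none else some (String.ofList t))
          ((List.zip hlist clean).foldl
            (fun d p => PySem.Dict.insert d (String.ofList p.1) p.2)
            PySem.Dict.empty).items)

-- ===== PORT B =====
-- while e > 0 and (e in cuts or not entry[e].isspace()): e -= 1
def pvWalkB (entry : List Char) (cuts : PySem.Set Int) (h : Int) : Int :=
  if _hpos : 0 < h then
    if cuts.contains h ||
        (match PySem.List.pyGet? entry h with
         | some ch => !PySem.Chars.isspace ch
         | none => false) then
      pvWalkB entry cuts (h - 1)
    else h
  else h
termination_by h.toNat
decreasing_by omega

def sparse_table_parse_alt (data : List String) (delim : String) : List (List (String × Option String)) :=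
  let ls := data.map String.toList
  match PySem.List.max? (ls.map (·.length)) id with
  | none => []  -- Python: max() on empty raises ValueError (excluded by Pre_)
  | some maxLen =>
    let lines := ls.map (fun l => l ++ List.replicate (maxLen - l.length) ' ')
    match lines with
    | [] => []
    | header :: rest =>
      let ht := header ++ [' ']
      match PySem.Chars.split₀ ht with
      | [] => []  -- Python: 'first, *rest_headers = …' raises ValueError (excluded by Pre_)
      | first :: rest_headers =>
        let hlist := [first] ++ rest_headers
        let ends := rest_headers.map (fun h => PySem.Chars.find ht (' ' :: h ++ [' ']))
        rest.map (fun entry =>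
          let cuts := ends.reverse.foldl (fun cs e => PySem.Set.add cs (pvWalkB entry cs e)) PySem.Set.empty
          let scuts := PySem.List.sorted cuts (fun q => q)
          let fp := scuts.foldl
            (fun (fp : List (List Char) × Int) cpos =>
              (fp.1 ++ [PySem.List.slice entry (some fp.2) (some cpos)], cpos + 1))
            ([], (0 : Int))
          let fields := fp.1 ++ [PySem.List.slice entry (some fp.2) none]
          ((List.zip hlist fields).foldl
            (fun d p =>
              let t := PySem.Chars.strip p.2
              PySem.Dict.insert d (String.ofList p.1) (if t = [] then none else some (String.ofList t)))
            PySem.Dict.empty).items)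

-- ===== PRECONDITION & SPEC =====
-- Pre_ excludes: inputs where A raises (empty data; a header line with no tokens; an empty
-- delimiter with data rows), and — only when the header has MORE THAN ONE column — corner
-- inputs on which A's returned value is an artefact of its delimiter-splicing mechanics
-- rather than table structure: a delimiter that is not a single non-whitespace character,
-- a delimiter character already present in a data row, whitespace other than ' ' inside the
-- header line (str.find then misses the column boundary and A splices at index -1), and
-- duplicate header names (each duplicate re-applies the boundary walk, shifting the
-- delimiter one extra cell). Single-column tables are covered for every delimiter.
def Pre_sparse_table_parse (data : List String) (delim : String) : Prop :=
  data ≠ [] ∧ delim ≠ "" ∧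
  PySem.Chars.split₀ (data.headD "").toList ≠ [] ∧
  ((PySem.Chars.split₀ (data.headD "").toList).length = 1 ∨
    (delim.toList.length = 1 ∧
     (delim.toList.all (fun c => !PySem.Chars.isspace c &&
        data.tail.all (fun l => !l.toList.contains c))) = true ∧
     ((data.headD "").toList.all (fun ch => ch == ' ' || !PySem.Chars.isspace ch)) = true ∧
     (PySem.Chars.split₀ (data.headD "").toList).Nodup))

instance (data : List String) (delim : String) : Decidable (Pre_sparse_table_parse data delim) := by
  unfold Pre_sparse_table_parse; infer_instance

def pvWitness_sparse_table_parse : List String × String := (["a b", "cd"], "#")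

def Spec_sparse_table_parse (data : List String) (delim : String) (out : List (List (String × Option String))) : Prop := out = sparse_table_parse_alt data delim
instance (data : List String) (delim : String) (out : List (List (String × Option String))) : Decidable (Spec_sparse_table_parse data delim out) := by unfold Spec_sparse_table_parse; infer_instance

-- ===== CLAIM (what is proved, stated in full; the proofs are below) =====
def Claim_equal_sparse_table_parse : Prop := ∀ (data : List String) (delim : String), Dom_sparse_table_parse data delim → Pre_sparse_table_parse data delim → Spec_sparse_table_parse data delim (sparse_table_parse data delim)

-- ===== LEMMAS AND PROOFS =====

/- ---------- split₀ characterization ---------- -/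

theorem pv_split₀_go_eq (l cur : List Char) (acc : List (List Char)) :
    PySem.Chars.split₀.go l cur acc =
      acc.reverse ++ ((l.splitOnP (fun c => PySem.Chars.isspace c)).modifyHead
        (cur.reverse ++ ·)).filter (fun t => !t.isEmpty) := by
  induction l generalizing cur acc with
  | nil =>
    by_cases h : cur = [] <;>
      simp [PySem.Chars.split₀.go, List.splitOnP_nil, List.modifyHead, h]
  | cons c rest ih =>
    by_cases hsp : PySem.Chars.isspace c
    · by_cases h : cur = [] <;>
        · simp [PySem.Chars.split₀.go, hsp, h, List.splitOnP_cons, ih]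
          congr 1
          show List.modifyHead id _ = _
          rw [List.modifyHead_id]
          rfl
    · simp only [PySem.Chars.split₀.go, hsp, Bool.false_eq_true, ite_false,
        List.splitOnP_cons, ih]
      rw [List.modifyHead_modifyHead]
      have hfe : ((fun x => cur.reverse ++ x) ∘ List.cons c) =
          (fun x => (c :: cur).reverse ++ x) := by
        funext x; simp
      rw [hfe]

theorem pv_split₀_eq (s : List Char) :
    PySem.Chars.split₀ s =
      (s.splitOnP (fun c => PySem.Chars.isspace c)).filter (fun t => !t.isEmpty) := by
  show PySem.Chars.split₀.go s [] [] = _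
  rw [pv_split₀_go_eq]
  simp only [List.reverse_nil, List.nil_append]
  congr 1
  show List.modifyHead id _ = _
  rw [List.modifyHead_id]
  rfl

theorem pv_splitOnP_append_ws (p : Char → Bool) (l ws : List Char) (hws : ∀ c ∈ ws, p c = true) :
    (l ++ ws).splitOnP p = l.splitOnP p ++ List.replicate ws.length [] := by
  have aux : ∀ ws : List Char, (∀ c ∈ ws, p c = true) →
      ws.splitOnP p = List.replicate (ws.length + 1) [] := by
    intro ws hws
    induction ws with
    | nil => simp [List.splitOnP_nil]
    | cons c t ih =>
      rw [List.splitOnP_cons, if_pos (hws c (by simp)), ih (fun x hx => hws x (by simp [hx]))]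
      simp [List.replicate_succ]
  induction l with
  | nil =>
    simpa using aux ws hws
  | cons c t ih =>
    by_cases hp : p c = true
    · rw [List.cons_append, List.splitOnP_cons, if_pos hp, List.splitOnP_cons, if_pos hp, ih]
      rfl
    · rw [List.cons_append, List.splitOnP_cons, if_neg hp, List.splitOnP_cons, if_neg hp, ih]
      obtain ⟨hd, tl, h⟩ := List.exists_cons_of_ne_nil (List.splitOnP_ne_nil p t)
      rw [h]
      simp [List.modifyHead_cons]

theorem pv_split₀_append_ws (l ws : List Char) (hws : ∀ c ∈ ws, PySem.Chars.isspace c = true) :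
    PySem.Chars.split₀ (l ++ ws) = PySem.Chars.split₀ l := by
  rw [pv_split₀_eq, pv_split₀_eq, pv_splitOnP_append_ws _ _ _ hws, List.filter_append]
  simp

theorem pv_splitOnP_prepend_nomatch {α : Type} [BEq α] (p : α → Bool) (u v : List α)
    (hu : ∀ c ∈ u, p c = false) :
    (u ++ v).splitOnP p = (v.splitOnP p).modifyHead (u ++ ·) := by
  have hmid : List.modifyHead (fun x : List α => x) (List.splitOnP p v) = List.splitOnP p v := by
    show List.modifyHead id _ = _
    rw [List.modifyHead_id]
    rfl
  induction u with
  | nil => simpa using hmid.symm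
  | cons c t ih =>
    rw [List.cons_append, List.splitOnP_cons, if_neg (by simp [hu c (by simp)]),
      ih (fun x hx => hu x (by simp [hx])), List.modifyHead_modifyHead]
    congr 1

theorem pv_splitOnP_nomatch {α : Type} [BEq α] (p : α → Bool) (u : List α)
    (hu : ∀ c ∈ u, p c = false) : u.splitOnP p = [u] := by
  have := pv_splitOnP_prepend_nomatch p u [] hu
  simpa [List.splitOnP_nil] using this

/- ---------- header tokens occur surrounded by spaces ---------- -/

theorem pv_token_infix_aux (s : List Char)
    (hs : ∀ ch ∈ s, ch = ' ' ∨ PySem.Chars.isspace ch = false) :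
    ∀ h ∈ PySem.Chars.split₀ s, (' ' :: (h ++ [' '])) <:+: (' ' :: (s ++ [' '])) := by
  generalize hn : s.length = n
  induction n using Nat.strong_induction_on generalizing s with
  | _ n ih =>
    subst hn
    cases s with
    | nil => intro h hmem; simp [pv_split₀_eq, List.splitOnP_nil] at hmem
    | cons c t =>
      by_cases hsp : PySem.Chars.isspace c = true
      · have hc : c = ' ' := by
          rcases hs c (by simp) with h | h
          · exact h
          · rw [h] at hsp; cases hsp
        intro h hmem
        have hmem' : h ∈ PySem.Chars.split₀ t := by
          rw [pv_split₀_eq, List.splitOnP_cons, if_pos hsp] at hmem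
          rw [pv_split₀_eq]
          simpa using hmem
        have hrec := ih t.length (by simp) t (fun ch hch => hs ch (by simp [hch])) rfl h hmem'
        subst hc
        exact hrec.trans (List.suffix_cons ' ' _).isInfix
      · have hu0 : (fun x => !PySem.Chars.isspace x) c = true := by simp [hsp]
        have hdecomp := (List.takeWhile_append_dropWhile
          (p := fun x => !PySem.Chars.isspace x) (l := c :: t))
        set u := List.takeWhile (fun x => !PySem.Chars.isspace x) (c :: t) with hu_def
        set r := List.dropWhile (fun x => !PySem.Chars.isspace x) (c :: t) with hr_def
        have hune : u ≠ [] := by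
          rw [hu_def, List.takeWhile_cons_of_pos (p := fun x => !PySem.Chars.isspace x) hu0]
          simp
        have humem : ∀ x ∈ u, PySem.Chars.isspace x = false := by
          intro x hx
          have := List.mem_takeWhile_imp hx
          simpa using this
        have hsplit : List.splitOnP (fun x => PySem.Chars.isspace x) (c :: t) =
            List.modifyHead (u ++ ·) (List.splitOnP (fun x => PySem.Chars.isspace x) r) := by
          conv_lhs => rw [← hdecomp]
          exact pv_splitOnP_prepend_nomatch _ u r humem
        cases hr : r with
        | nil =>
          intro h hmem
          rw [pv_split₀_eq, hsplit, hr, List.splitOnP_nil, List.modifyHead_cons] at hmem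
          have hkeep : (!u.isEmpty) = true := by simpa [List.isEmpty_iff] using hune
          simp only [List.append_nil, List.filter_cons, hkeep, if_true, List.filter_nil,
            List.mem_singleton] at hmem
          have hs_eq : c :: t = u := by rw [← hdecomp, hr, List.append_nil]
          rw [hmem, ← hs_eq]
        | cons r0 r' =>
          have hr0sp : PySem.Chars.isspace r0 = true := by
            have hdw : List.dropWhile (fun x => !PySem.Chars.isspace x) (c :: t) = r0 :: r' := by
              rw [← hr_def]; exact hr
            have hne : List.dropWhile (fun x => !PySem.Chars.isspace x) (c :: t) ≠ [] := by
              simp [hdw]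
            have h2 := List.head_dropWhile_not (fun x => !PySem.Chars.isspace x) hne
            simpa [hdw] using h2
          have hr0 : r0 = ' ' := by
            have hr0mem : r0 ∈ c :: t := by
              rw [← hdecomp, hr]; exact List.mem_append_right _ (by simp)
            rcases hs r0 hr0mem with h | h
            · exact h
            · rw [h] at hr0sp; cases hr0sp
          have hsplit2 : PySem.Chars.split₀ (c :: t) = u :: PySem.Chars.split₀ r' := by
            rw [pv_split₀_eq, hsplit, hr, List.splitOnP_cons, if_pos hr0sp,
              List.modifyHead_cons, pv_split₀_eq]
            have hkeep : (!u.isEmpty) = true := by simpa [List.isEmpty_iff] using hune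
            simp [hkeep]
          have hs_eq : c :: t = u ++ ' ' :: r' := by rw [← hdecomp, hr, hr0]
          intro h hmem
          rw [hsplit2] at hmem
          rcases List.mem_cons.mp hmem with rfl | hmem'
          · rw [hs_eq]
            refine List.IsPrefix.isInfix ?_
            refine ⟨r' ++ [' '], ?_⟩
            simp
          · have hlen : r'.length < (c :: t).length := by
              rw [hs_eq]; simp; omega
            have hrec := ih r'.length hlen r'
              (fun ch hch => hs ch (by rw [hs_eq]; exact List.mem_append_right _ (by simp [hch]))) rfl h hmem'
            have hsuf : (' ' :: (r' ++ [' '])) <:+ (' ' :: ((c :: t) ++ [' '])) := by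
              refine ⟨' ' :: u, ?_⟩
              rw [hs_eq]; simp
            exact hrec.trans hsuf.isInfix

theorem pv_token_infix (s : List Char)
    (hs : ∀ ch ∈ s, ch = ' ' ∨ PySem.Chars.isspace ch = false) :
    ∀ h ∈ (PySem.Chars.split₀ s).drop 1, (' ' :: (h ++ [' '])) <:+: (s ++ [' ']) := by
  cases s with
  | nil => intro h hmem; simp [pv_split₀_eq, List.splitOnP_nil] at hmem
  | cons c t =>
    by_cases hsp : PySem.Chars.isspace c = true
    · have hc : c = ' ' := by
        rcases hs c (by simp) with h | h
        · exact h
        · rw [h] at hsp; cases hsp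
      intro h hmem
      have hmem' : h ∈ PySem.Chars.split₀ t := by
        rw [pv_split₀_eq, List.splitOnP_cons, if_pos hsp] at hmem
        rw [pv_split₀_eq]
        have h1 : h ∈ List.drop 1 (List.filter (fun t => !t.isEmpty)
            (List.splitOnP (fun c => PySem.Chars.isspace c) t)) := by
          simpa [List.drop_one] using hmem
        exact List.mem_of_mem_drop h1
      have := pv_token_infix_aux t (fun ch hch => hs ch (by simp [hch])) h hmem'
      subst hc
      simpa using this
    · have hu0 : (fun x => !PySem.Chars.isspace x) c = true := by simp [hsp]
      have hdecomp := (List.takeWhile_append_dropWhile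
        (p := fun x => !PySem.Chars.isspace x) (l := c :: t))
      set u := List.takeWhile (fun x => !PySem.Chars.isspace x) (c :: t) with hu_def
      set r := List.dropWhile (fun x => !PySem.Chars.isspace x) (c :: t) with hr_def
      have hune : u ≠ [] := by
        rw [hu_def, List.takeWhile_cons_of_pos (p := fun x => !PySem.Chars.isspace x) hu0]
        simp
      have humem : ∀ x ∈ u, PySem.Chars.isspace x = false := by
        intro x hx
        have := List.mem_takeWhile_imp hx
        simpa using this
      have hsplit : List.splitOnP (fun x => PySem.Chars.isspace x) (c :: t) =
          List.modifyHead (u ++ ·) (List.splitOnP (fun x => PySem.Chars.isspace x) r) := by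
        conv_lhs => rw [← hdecomp]
        exact pv_splitOnP_prepend_nomatch _ u r humem
      cases hr : r with
      | nil =>
        intro h hmem
        rw [pv_split₀_eq, hsplit, hr, List.splitOnP_nil, List.modifyHead_cons] at hmem
        have hkeep : (!u.isEmpty) = true := by simpa [List.isEmpty_iff] using hune
        simp only [List.append_nil, List.filter_cons, hkeep, if_true, List.filter_nil] at hmem
        simp at hmem
      | cons r0 r' =>
        have hr0sp : PySem.Chars.isspace r0 = true := by
          have hdw : List.dropWhile (fun x => !PySem.Chars.isspace x) (c :: t) = r0 :: r' := by
            rw [← hr_def]; exact hr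
          have hne : List.dropWhile (fun x => !PySem.Chars.isspace x) (c :: t) ≠ [] := by
            simp [hdw]
          have h2 := List.head_dropWhile_not (fun x => !PySem.Chars.isspace x) hne
          simpa [hdw] using h2
        have hr0 : r0 = ' ' := by
          have hr0mem : r0 ∈ c :: t := by
            rw [← hdecomp, hr]; exact List.mem_append_right _ (by simp)
          rcases hs r0 hr0mem with h | h
          · exact h
          · rw [h] at hr0sp; cases hr0sp
        have hsplit2 : PySem.Chars.split₀ (c :: t) = u :: PySem.Chars.split₀ r' := by
          rw [pv_split₀_eq, hsplit, hr, List.splitOnP_cons, if_pos hr0sp,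
            List.modifyHead_cons, pv_split₀_eq]
          have hkeep : (!u.isEmpty) = true := by simpa [List.isEmpty_iff] using hune
          simp [hkeep]
        have hs_eq : c :: t = u ++ ' ' :: r' := by rw [← hdecomp, hr, hr0]
        intro h hmem
        rw [hsplit2, List.drop_one, List.tail_cons] at hmem
        have hrec := pv_token_infix_aux r'
          (fun ch hch => hs ch (by rw [hs_eq]; exact List.mem_append_right _ (by simp [hch]))) h hmem
        have hsuf : (' ' :: (r' ++ [' '])) <:+ ((c :: t) ++ [' ']) := by
          refine ⟨u, ?_⟩
          rw [hs_eq]; simp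
        exact hrec.trans hsuf.isInfix

theorem pv_token_ne_nil (s : List Char) : ∀ h ∈ PySem.Chars.split₀ s, h ≠ [] := by
  intro h hmem
  rw [pv_split₀_eq] at hmem
  have := List.of_mem_filter hmem
  simpa [List.isEmpty_iff] using this

/- ---------- splitOnMax with a slack maxsplit is splitOnP ---------- -/

theorem pv_splitOnMax_go_eq (c : Char) :
    ∀ (l : List Char) (fuel m : Nat) (cur : List Char) (acc : List (List Char)),
      l.length < fuel → l.count c ≤ m →
      PySem.Chars.splitOnMax.go [c] fuel m l cur acc =
        acc.reverse ++ (l.splitOnP (· == c)).modifyHead (cur.reverse ++ ·) := by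
  intro l
  induction l with
  | nil =>
    intro fuel m cur acc hf hcount
    cases fuel with
    | zero => simp at hf
    | succ f =>
      simp [PySem.Chars.splitOnMax.go, List.splitOnP_nil, List.modifyHead_cons]
  | cons a rest ih =>
    intro fuel m cur acc hf hcount
    cases fuel with
    | zero => simp at hf
    | succ f =>
      by_cases hm : m = 0
      · subst hm
        have hnotc : c ∉ a :: rest := by
          rw [← List.count_eq_zero]
          omega
        rw [pv_splitOnP_nomatch (· == c) (a :: rest)
          (fun x hx => by
            have : x ≠ c := fun hxc => hnotc (hxc ▸ hx)
            simpa using this)]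
        simp [PySem.Chars.splitOnMax.go, List.modifyHead_cons]
      · by_cases hca : a = c
        · subst hca
          have hpre : List.isPrefixOf [a] (a :: rest) = true := by simp [List.isPrefixOf]
          have hcount' : rest.count a ≤ m - 1 := by
            rw [List.count_cons_self] at hcount
            omega
          rw [show PySem.Chars.splitOnMax.go [a] (f + 1) m (a :: rest) cur acc =
              PySem.Chars.splitOnMax.go [a] f (m - 1) (List.drop 1 (a :: rest)) []
                (cur.reverse :: acc) by
            simp [PySem.Chars.splitOnMax.go, hm, hpre]]
          rw [List.drop_one, List.tail_cons,
            ih f (m - 1) [] (cur.reverse :: acc) (by simpa using hf) (by simpa using hcount')]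
          rw [List.splitOnP_cons]
          simp only [BEq.rfl, if_true, List.modifyHead_cons]
          have hmid : List.modifyHead (fun x : List Char => [] ++ x)
              (List.splitOnP (· == a) rest) = List.splitOnP (· == a) rest := by
            show List.modifyHead id _ = _
            rw [List.modifyHead_id]
            rfl
          simp only [List.reverse_nil, hmid]
          simp
        · have hpre : List.isPrefixOf [c] (a :: rest) = false := by
            simp [List.isPrefixOf]
            first
            | exact fun h => hca h
            | exact fun h => hca h.symm
          have hcount' : rest.count c ≤ m := by
            rw [List.count_cons_of_ne hca] at hcount
            exact hcount
          rw [show PySem.Chars.splitOnMax.go [c] (f + 1) m (a :: rest) cur acc =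
              PySem.Chars.splitOnMax.go [c] f m rest (a :: cur) acc by
            simp [PySem.Chars.splitOnMax.go, hm, hpre]]
          rw [ih f m (a :: cur) acc (by simpa using hf) hcount']
          rw [List.splitOnP_cons, if_neg (by simpa using hca), List.modifyHead_modifyHead]
          congr 2
          funext x
          simp

theorem pv_splitOnMax_eq (c : Char) (l : List Char) (M : Int)
    (h0 : 0 ≤ M) (hc : (l.count c : Int) ≤ M) :
    PySem.Chars.splitOnMax l [c] M = l.splitOnP (· == c) := by
  rw [PySem.Chars.splitOnMax.eq_1, if_neg (by omega)]
  have h1 : l.length < l.length + 1 := by omega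
  have h2 : l.count c ≤ M.toNat := by omega
  rw [pv_splitOnMax_go_eq c l (l.length + 1) M.toNat [] [] h1 h2]
  have hmid : List.modifyHead (fun x : List Char => [] ++ x)
      (List.splitOnP (· == c) l) = List.splitOnP (· == c) l := by
    show List.modifyHead id _ = _
    rw [List.modifyHead_id]
    rfl
  simpa using hmid

/- ---------- the cut-set model of A's splice loop ---------- -/

def pvApply (c : Char) (l : List Char) (qs : List Int) : List Char :=
  qs.foldl (fun l q => l.set q.toNat c) l

theorem pv_length_apply (c : Char) (l : List Char) (qs : List Int) :
    (pvApply c l qs).length = l.length := by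
  induction qs generalizing l with
  | nil => rfl
  | cons q rest ih => simp [pvApply, List.foldl_cons] at ih ⊢; rw [ih, List.length_set]

theorem pv_getElem?_apply (c : Char) (l : List Char) (qs : List Int) (hqs : ∀ q ∈ qs, 0 ≤ q)
    (i : Nat) (hi : i < l.length) :
    (pvApply c l qs)[i]? = some (if (i : Int) ∈ qs then c else l[i]'hi) := by
  induction qs generalizing l with
  | nil => simp [pvApply, List.getElem?_eq_getElem hi]
  | cons q rest ih =>
    have hq0 : 0 ≤ q := hqs q (by simp)
    have step : pvApply c l (q :: rest) = pvApply c (l.set q.toNat c) rest := rfl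
    rw [step]
    have hi' : i < (l.set q.toNat c).length := by rw [List.length_set]; exact hi
    rw [ih (l.set q.toNat c) (fun r hr => hqs r (by simp [hr])) hi']
    by_cases hmem : (i : Int) ∈ rest
    · simp [hmem]
    · by_cases hqi : (i : Int) = q
      · have h2 : q.toNat = i := by omega
        simp [hmem, hqi, h2, List.getElem_set]
      · have h2 : ¬ q.toNat = i := by omega
        simp [hmem, hqi, List.getElem_set, h2]

theorem pv_count_apply (c : Char) (l : List Char) (qs : List Int) :
    (pvApply c l qs).count c ≤ l.count c + qs.length := by
  induction qs generalizing l with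
  | nil => simp [pvApply]
  | cons q rest ih =>
    have step : pvApply c l (q :: rest) = pvApply c (l.set q.toNat c) rest := rfl
    rw [step]
    have h1 := ih (l.set q.toNat c)
    have h2 : (l.set q.toNat c).count c ≤ l.count c + 1 := by
      by_cases h : q.toNat < l.length
      · rw [List.count_set h]
        split_ifs <;> omega
      · rw [List.set_eq_of_length_le (by omega)]
        omega
    simp only [List.length_cons]
    omega

theorem pv_apply_mem_set (c : Char) (l : List Char) (qs : List Int) (q : Int)
    (hq : q ∈ qs) (hqs : ∀ r ∈ qs, 0 ≤ r) (hlt : q.toNat < l.length) :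
    (pvApply c l qs).set q.toNat c = pvApply c l qs := by
  apply List.ext_getElem?
  intro i
  rw [List.getElem?_set]
  by_cases hil : i < l.length
  · rw [pv_getElem?_apply c l qs hqs i hil]
    by_cases hqi : q.toNat = i
    · have hmem : (i : Int) ∈ qs := by
        have h3 : (i : Int) = q := by have := hqs q hq; omega
        rw [h3]; exact hq
      simp only [hqi, hmem, if_true, if_pos]
      rw [if_pos (by rw [pv_length_apply]; exact hil)]
    · simp [hqi]
  · have hlen : (pvApply c l qs).length ≤ i := by rw [pv_length_apply]; omega
    rw [if_neg (by omega), List.getElem?_eq_none hlen]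

theorem pv_apply_perm (c : Char) (l : List Char) {qs qs' : List Int} (hp : qs.Perm qs') :
    pvApply c l qs = pvApply c l qs' := by
  have rc : RightCommutative (fun (l : List Char) (q : Int) => l.set q.toNat c) := by
    constructor
    intro l q1 q2
    by_cases h : q1.toNat = q2.toNat
    · rw [h]
    · exact List.set_comm _ _ h
  exact hp.foldl_eq l

theorem pv_pyGet?_pos {α : Type} (l : List α) (e : Int) (h0 : 0 ≤ e) (hl : e < l.length) :
    PySem.List.pyGet? l e = some (l[e.toNat]'(by omega)) := by
  unfold PySem.List.pyGet? PySem.List.pyIdx?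
  rw [if_pos h0, if_pos (by omega)]
  simp [List.getElem?_eq_getElem (by omega : e.toNat < l.length)]

/- walk equivalence on the cut-set model -/

theorem pv_walk_eq (c : Char) (hc : PySem.Chars.isspace c = false) (entry : List Char)
    (cuts : List Int) (hqs : ∀ q ∈ cuts, 0 ≤ q ∧ q < entry.length) (e : Int)
    (he : e < entry.length) :
    pvWalkA (pvApply c entry cuts) e = pvWalkB entry cuts e := by
  generalize hn : e.toNat = n
  induction n using Nat.strong_induction_on generalizing e with
  | _ n ih =>
    subst hn
    rw [pvWalkA, pvWalkB]
    by_cases hpos : 0 < e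
    · rw [dif_pos hpos, dif_pos hpos]
      have hel : e < (pvApply c entry cuts).length := by rw [pv_length_apply]; exact he
      rw [pv_pyGet?_pos _ e (by omega) hel]
      have hget : (pvApply c entry cuts)[e.toNat]'(by omega) =
          if (e.toNat : Int) ∈ cuts then c else entry[e.toNat]'(by omega) := by
        have := pv_getElem?_apply c entry cuts (fun q hq => (hqs q hq).1) e.toNat (by omega)
        rw [List.getElem?_eq_getElem (l := pvApply c entry cuts) (by omega)] at this
        exact Option.some_injective _ this
      have hcast : ((e.toNat : Int)) = e := by omega
      rw [hcast] at hget
      by_cases hmem : e ∈ cuts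
      · have hcont : PySem.Set.contains cuts e = true := (PySem.Set.contains_iff cuts e).mpr hmem
        rw [hget, if_pos hmem]
        simp only [hc, Bool.false_eq_true, if_false, hcont, Bool.true_or, eq_self_iff_true,
          if_true]
        exact ih (e - 1).toNat (by omega) (e - 1) (by omega) rfl
      · have hcont : PySem.Set.contains cuts e = false := by
          rw [Bool.eq_false_iff]
          exact fun hcont2 => hmem ((PySem.Set.contains_iff _ _).mp hcont2)
        rw [hget, if_neg hmem]
        rw [pv_pyGet?_pos entry e (by omega) he]
        by_cases hsp : PySem.Chars.isspace (entry[e.toNat]'(by omega)) = true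
        · simp only [hsp, eq_self_iff_true, if_true, hcont, Bool.not_true, Bool.false_or,
            Bool.false_eq_true, if_false]
        · simp only [Bool.not_eq_true] at hsp
          simp only [hsp, Bool.false_eq_true, if_false, hcont, Bool.false_or, Bool.not_false,
            eq_self_iff_true, if_true]
          exact ih (e - 1).toNat (by omega) (e - 1) (by omega) rfl
    · rw [dif_neg hpos, dif_neg hpos]

theorem pv_walk_bounds (entry : List Char) (cuts : List Int) (e : Int) (h0 : 0 ≤ e) :
    0 ≤ pvWalkB entry cuts e ∧ pvWalkB entry cuts e ≤ e := by
  generalize hn : e.toNat = n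
  induction n using Nat.strong_induction_on generalizing e with
  | _ n ih =>
    subst hn
    rw [pvWalkB]
    by_cases hpos : 0 < e
    · rw [dif_pos hpos]
      by_cases hcond : (PySem.Set.contains cuts e ||
          (match PySem.List.pyGet? entry e with
           | some ch => !PySem.Chars.isspace ch
           | none => false)) = true
      · rw [if_pos hcond]
        have h1 := ih (e - 1).toNat (by omega) (e - 1) (by omega) rfl
        omega
      · rw [if_neg hcond]
        omega
    · rw [dif_neg hpos]
      omega

/- A's splice at an in-range position is List.set -/

theorem pv_splice_eq_set (c : Char) (entry : List Char) (h : Int) (h0 : 0 ≤ h)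
    (hl : h.toNat < entry.length) :
    pvSpliceA [c] entry h = entry.set h.toNat c := by
  unfold pvSpliceA
  rw [PySem.List.slice_from _ (by omega : (0:Int) ≤ h + 1)]
  have hb : h = ((h.toNat : Nat) : Int) := by omega
  rw [hb, PySem.List.slice_to_natCast]
  have h2 : (((h.toNat : Nat) : Int) + 1).toNat = h.toNat + 1 := by omega
  rw [h2]
  have h3 : (((h.toNat : Nat) : Int)).toNat = h.toNat := by omega
  rw [h3, List.set_eq_take_cons_drop c hl]
  simp

/- the A-loop over ends equals the cut-set model of B's loop -/

theorem pv_loop_eq (c : Char) (hc : PySem.Chars.isspace c = false) (entry : List Char)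
    (ends : List Int) (hE : ∀ e ∈ ends, 0 ≤ e ∧ e < entry.length) :
    ∀ (cuts : List Int), (∀ q ∈ cuts, 0 ≤ q ∧ q < entry.length) → cuts.Nodup →
      ends.foldl (fun e d => pvSpliceA [c] e (pvWalkA e d)) (pvApply c entry cuts) =
        pvApply c entry (ends.foldl (fun cs d => PySem.Set.add cs (pvWalkB entry cs d)) cuts) := by
  induction ends with
  | nil => intro cuts _ _; simp
  | cons e rest ih =>
    intro cuts hcb hnd
    have he := hE e (by simp)
    have hrest : ∀ d ∈ rest, 0 ≤ d ∧ d < (entry.length : Int) := fun d hd => hE d (by simp [hd])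
    simp only [List.foldl_cons]
    have hwalk : pvWalkA (pvApply c entry cuts) e = pvWalkB entry cuts e :=
      pv_walk_eq c hc entry cuts hcb e he.2
    set w := pvWalkB entry cuts e with hw
    have hwb : 0 ≤ w ∧ w ≤ e := pv_walk_bounds entry cuts e he.1
    have hwlt : w < (entry.length : Int) := by omega
    have hsplice : pvSpliceA [c] (pvApply c entry cuts) (pvWalkA (pvApply c entry cuts) e) =
        (pvApply c entry cuts).set w.toNat c := by
      rw [hwalk]
      exact pv_splice_eq_set c _ w hwb.1 (by rw [pv_length_apply]; omega)
    rw [hsplice]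
    by_cases hmem : w ∈ cuts
    · have hadd : PySem.Set.add cuts w = cuts := PySem.Set.add_of_mem hmem
      rw [pv_apply_mem_set c entry cuts w hmem (fun r hr => (hcb r hr).1)
        (by omega), hadd]
      exact ih hrest cuts hcb hnd
    · have hcont : PySem.Set.contains cuts w = false := by
        rw [Bool.eq_false_iff]
        exact fun h2 => hmem ((PySem.Set.contains_iff _ _).mp h2)
      have hadd : PySem.Set.add cuts w = cuts ++ [w] := by
        rw [PySem.Set.add.eq_1, hcont]
        simp
      rw [hadd]
      have happ : (pvApply c entry cuts).set w.toNat c = pvApply c entry (cuts ++ [w]) := by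
        unfold pvApply
        rw [List.foldl_append]
        rfl
      rw [happ]
      exact ih hrest (cuts ++ [w])
        (fun r hr => by
          rcases List.mem_append.mp hr with h | h
          · exact hcb r h
          · simp at h; subst h; exact ⟨hwb.1, hwlt⟩)
        (by
          rw [List.nodup_append]
          refine ⟨hnd, List.nodup_singleton _, ?_⟩
          intro a ha b hb hab
          rw [List.mem_singleton] at hb
          rw [hb] at hab
          rw [hab] at ha
          exact hmem ha)

theorem pv_cuts_bounds (entry : List Char) (ends : List Int)
    (hE : ∀ e ∈ ends, 0 ≤ e ∧ e < entry.length) (cuts : List Int)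
    (hc : ∀ q ∈ cuts, 0 ≤ q ∧ q < entry.length) :
    ∀ q ∈ ends.foldl (fun cs d => PySem.Set.add cs (pvWalkB entry cs d)) cuts,
      0 ≤ q ∧ q < entry.length := by
  induction ends generalizing cuts with
  | nil => exact fun q hq => hc q hq
  | cons e rest ih =>
    intro q hq
    simp only [List.foldl_cons] at hq
    have he := hE e (by simp)
    have hwb := pv_walk_bounds entry cuts e he.1
    refine ih (fun d hd => hE d (by simp [hd])) (PySem.Set.add cuts (pvWalkB entry cuts e))
      (fun r hr => ?_) q hq
    rcases (PySem.Set.mem_add _ _ _).mp hr with h | h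
    · exact hc r h
    · rw [h]; exact ⟨hwb.1, by omega⟩

theorem pv_cuts_nodup (entry : List Char) (ends : List Int) (cuts : List Int) (h : cuts.Nodup) :
    (ends.foldl (fun cs d => PySem.Set.add cs (pvWalkB entry cs d)) cuts).Nodup := by
  induction ends generalizing cuts with
  | nil => exact h
  | cons e rest ih =>
    simp only [List.foldl_cons]
    refine ih _ ?_
    rw [PySem.Set.add.eq_1]
    split
    · exact h
    · next hcont =>
      rw [List.nodup_append]
      refine ⟨h, List.nodup_singleton _, ?_⟩
      intro a ha b hb hab
      rw [List.mem_singleton] at hb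
      rw [hb] at hab
      rw [hab] at ha
      exact absurd ((PySem.Set.contains_iff _ _).mpr ha) (by simpa using hcont)

theorem pv_cuts_length (entry : List Char) (ends : List Int) (cuts : List Int) :
    (ends.foldl (fun cs d => PySem.Set.add cs (pvWalkB entry cs d)) cuts).length ≤
      cuts.length + ends.length := by
  induction ends generalizing cuts with
  | nil => simp
  | cons e rest ih =>
    simp only [List.foldl_cons, List.length_cons]
    have h1 := ih (PySem.Set.add cuts (pvWalkB entry cuts e))
    have h2 : (PySem.Set.add cuts (pvWalkB entry cuts e)).length ≤ cuts.length + 1 := by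
      rw [PySem.Set.add.eq_1]
      split <;> simp
    omega

/- ---------- slicing at sorted cut positions ---------- -/

def pvFieldsOf (entry : List Char) : List Nat → List (List Char)
  | [] => [entry]
  | q :: rest => entry.take q :: pvFieldsOf (entry.drop (q + 1)) (rest.map (· - (q + 1)))
termination_by qs => qs.length
decreasing_by simp

theorem pv_apply_shift (c : Char) (u w : List Char) (qs : List Int)
    (h : ∀ q ∈ qs, (u.length : Int) ≤ q) :
    pvApply c (u ++ w) qs = u ++ pvApply c w (qs.map (· - (u.length : Int))) := by
  induction qs generalizing w with
  | nil => rfl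
  | cons q rest ih =>
    have hq := h q (by simp)
    have step : pvApply c (u ++ w) (q :: rest) = pvApply c ((u ++ w).set q.toNat c) rest := rfl
    rw [step, List.set_append_right q.toNat c (by omega)]
    have step2 : (q :: rest).map (· - (u.length : Int)) =
        (q - (u.length : Int)) :: rest.map (· - (u.length : Int)) := rfl
    rw [step2]
    have step3 : pvApply c w ((q - (u.length : Int)) :: rest.map (· - (u.length : Int))) =
        pvApply c (w.set (q - (u.length : Int)).toNat c) (rest.map (· - (u.length : Int))) := rfl
    rw [step3]
    have hnn : (q - (u.length : Int)).toNat = q.toNat - u.length := by omega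
    rw [hnn]
    exact ih (w.set (q.toNat - u.length) c) (fun r hr => h r (by simp [hr]))

theorem pv_splitOn_apply (c : Char) : ∀ (qs : List Int) (entry : List Char),
    (∀ q ∈ qs, 0 ≤ q ∧ q < entry.length) → qs.Pairwise (· < ·) → c ∉ entry →
    (pvApply c entry qs).splitOnP (· == c) =
      pvFieldsOf entry (qs.map Int.toNat) := by
  intro qs
  generalize hn : qs.length = n
  induction n using Nat.strong_induction_on generalizing qs with
  | _ n ih =>
    subst hn
    cases qs with
    | nil =>
      intro entry _ _ hce
      simp only [pvApply, List.foldl_nil, List.map_nil, pvFieldsOf]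
      exact pv_splitOnP_nomatch _ entry (fun x hx => by
        have : x ≠ c := fun h => hce (h ▸ hx)
        simpa using this)
    | cons q rest =>
      intro entry hb hpw hce
      have hq := hb q (by simp)
      have hql : q.toNat < entry.length := by omega
      have hrest_gt : ∀ r ∈ rest, q < r := (List.pairwise_cons.mp hpw).1
      have hstep : pvApply c entry (q :: rest) = pvApply c (entry.set q.toNat c) rest := rfl
      have hset : entry.set q.toNat c =
          (entry.take q.toNat ++ [c]) ++ entry.drop (q.toNat + 1) := by
        rw [List.set_eq_take_cons_drop c hql]; simp
      have hulen : (entry.take q.toNat ++ [c]).length = q.toNat + 1 := by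
        simp [List.length_take, Nat.min_eq_left (le_of_lt hql)]
      have hshift : pvApply c (entry.set q.toNat c) rest =
          (entry.take q.toNat ++ [c]) ++
            pvApply c (entry.drop (q.toNat + 1)) (rest.map (· - ((q.toNat : Int) + 1))) := by
        rw [hset, pv_apply_shift c _ _ rest (fun r hr => by
          have := hrest_gt r hr
          rw [hulen]; push_cast; omega)]
        rw [hulen]
        push_cast
        rfl
      rw [hstep, hshift]
      have htake_noc : ∀ x ∈ entry.take q.toNat, ((x == c) : Bool) = false := by
        intro x hx
        have : x ≠ c := fun h => hce (h ▸ List.mem_of_mem_take hx)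
        simpa using this
      rw [List.append_assoc, pv_splitOnP_prepend_nomatch _ _ _ htake_noc,
        List.singleton_append]
      rw [List.splitOnP_cons, if_pos (by simp), List.modifyHead_cons, List.append_nil]
      -- IH
      have hdl : (entry.drop (q.toNat + 1)).length = entry.length - (q.toNat + 1) := by
        simp
      have hih := ih rest.length (by simp) (rest.map (· - ((q.toNat : Int) + 1)))
        (by simp) (entry.drop (q.toNat + 1))
        (fun r hr => by
          obtain ⟨r0, hr0, rfl⟩ := List.mem_map.mp hr
          have h1 := hrest_gt r0 hr0
          have h2 := hb r0 (by simp [hr0])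
          rw [hdl]
          constructor <;> [omega; (push_cast; omega)])
        (by
          refine List.Pairwise.map _ ?_ (List.pairwise_cons.mp hpw).2
          intro a b hab; omega)
        (fun hmem => hce (List.mem_of_mem_drop hmem))
      rw [hih]
      simp only [List.map_cons, pvFieldsOf]
      congr 2
      rw [List.map_map, List.map_map]
      refine List.map_congr_left ?_
      intro r hr
      have h1 := hrest_gt r hr
      simp only [Function.comp_apply]
      omega

theorem pv_fields_fold (entry : List Char) : ∀ (qs : List Int) (acc : List (List Char)) (prev : Int),
    0 ≤ prev → (∀ q ∈ qs, prev ≤ q ∧ q < entry.length) → qs.Pairwise (· < ·) →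
    (qs.foldl (fun (fp : List (List Char) × Int) cpos =>
        (fp.1 ++ [PySem.List.slice entry (some fp.2) (some cpos)], cpos + 1)) (acc, prev)).1 ++
      [PySem.List.slice entry
        (some (qs.foldl (fun (fp : List (List Char) × Int) cpos =>
          (fp.1 ++ [PySem.List.slice entry (some fp.2) (some cpos)], cpos + 1)) (acc, prev)).2) none] =
      acc ++ pvFieldsOf (entry.drop prev.toNat) (qs.map (fun q => (q - prev).toNat)) := by
  intro qs
  induction qs with
  | nil =>
    intro acc prev h0 _ _
    simp only [List.foldl_nil, List.map_nil, pvFieldsOf]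
    rw [PySem.List.slice_from _ h0]
  | cons q rest ih =>
    intro acc prev h0 hb hpw
    have hq := hb q (by simp)
    have hrest_gt : ∀ r ∈ rest, q < r := (List.pairwise_cons.mp hpw).1
    simp only [List.foldl_cons]
    rw [ih (acc ++ [PySem.List.slice entry (some prev) (some q)]) (q + 1) (by omega)
      (fun r hr => ⟨by have := hrest_gt r hr; omega, (hb r (by simp [hr])).2⟩)
      (List.pairwise_cons.mp hpw).2]
    simp only [List.map_cons, pvFieldsOf, List.append_assoc, List.singleton_append]
    congr 1
    congr 1
    · rw [PySem.List.slice_toNat _ h0 (by omega)]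
      have he : q.toNat - prev.toNat = (q - prev).toNat := by omega
      rw [he]
    · rw [List.drop_drop]
      have he2 : prev.toNat + ((q - prev).toNat + 1) = (q + 1).toNat := by omega
      rw [he2]
      congr 1
      · rw [List.map_map]
        refine List.map_congr_left ?_
        intro r hr
        have h1 := hrest_gt r hr
        simp only [Function.comp_apply]
        omega

/- ---------- the nodup-name spec scan is a plain fold over the ends ---------- -/

theorem pv_inner_none {β : Type} (F : β → Int → β) (specs : List (List Char × Int))
    (col : List Char) (h : ∀ sp ∈ specs, sp.1 ≠ col) (e : β) :
    specs.foldl (fun e sp => if sp.1 = col then F e sp.2 else e) e = e := by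
  induction specs with
  | nil => rfl
  | cons sp rest ih =>
    rw [List.foldl_cons, if_neg (h sp (by simp)), ih (fun s hs => h s (by simp [hs]))]

theorem pv_outer_fold {β : Type} (F : β → Int → β) :
    ∀ (ns : List (List Char)) (es : List Int) (extra : List (List Char × Int)) (e0 : β),
      ns.Nodup → ns.length = es.length → (∀ sp ∈ extra, sp.1 ∉ ns) →
      ns.reverse.foldl (fun e col =>
          (ns.zip es ++ extra).foldl (fun e sp => if sp.1 = col then F e sp.2 else e) e) e0 =
        es.reverse.foldl F e0 := by
  intro ns
  induction ns using List.reverseRecOn with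
  | nil =>
    intro es extra e0 _ hlen _
    have hes : es = [] := List.eq_nil_of_length_eq_zero (by simpa using hlen.symm)
    subst hes; rfl
  | append_singleton ns' a ih =>
    intro es extra e0 hnd hlen hextra
    have hlen' : ns'.length + 1 = es.length := by simpa using hlen
    have hesne : es ≠ [] := by intro h; subst h; simp at hlen'
    obtain ⟨es', b, rfl⟩ : ∃ es' b, es = es' ++ [b] := by
      refine ⟨es.dropLast, es.getLast hesne, (List.dropLast_append_getLast hesne).symm⟩
    have hlen2 : ns'.length = es'.length := by simpa using hlen'
    have hnd' : ns'.Nodup := (List.nodup_append.mp hnd).1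
    have hani : a ∉ ns' := by
      have := (List.nodup_append.mp hnd).2.2
      intro hmem; exact this a hmem a (by simp) rfl
    have hzip : (ns' ++ [a]).zip (es' ++ [b]) = ns'.zip es' ++ [(a, b)] :=
      List.zip_append hlen2
    have hlist : (ns' ++ [a]).zip (es' ++ [b]) ++ extra = ns'.zip es' ++ ((a, b) :: extra) := by
      rw [hzip, List.append_assoc]; rfl
    rw [hlist]
    have hrev : (ns' ++ [a]).reverse = a :: ns'.reverse := by simp
    rw [hrev, List.foldl_cons]
    -- first outer step, col = a
    have hstep : (ns'.zip es' ++ ((a, b) :: extra)).foldl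
        (fun e sp => if sp.1 = a then F e sp.2 else e) e0 = F e0 b := by
      rw [List.foldl_append]
      rw [pv_inner_none F _ a (fun sp hsp => by
        have := List.of_mem_zip hsp
        intro h; exact hani (h ▸ this.1)) e0]
      rw [List.foldl_cons, if_pos rfl]
      exact pv_inner_none F extra a (fun sp hsp => by
        intro h; exact hextra sp hsp (by simp [h])) (F e0 b)
    rw [hstep]
    have := ih (es') ((a, b) :: extra) (F e0 b) hnd' hlen2 (fun sp hsp => by
      rcases List.mem_cons.mp hsp with rfl | hsp'
      · exact hani
      · intro hmem; exact hextra sp hsp' (by simp [hmem]))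
    rw [this]
    simp

/- ---------- small helpers ---------- -/

theorem pv_max?_spec (xs : List Nat) (hne : xs ≠ []) :
    ∃ m, PySem.List.max? xs id = some m ∧ ∀ x ∈ xs, x ≤ m := by
  have aux : ∀ (f : Option Nat → Nat → Option Nat), (∀ a b, (f (some a) b).isSome) →
      ∀ (ys : List Nat) (m0 : Nat), ∃ m, List.foldl f (some m0) ys = some m := by
    intro f hf ys
    induction ys with
    | nil => exact fun m0 => ⟨m0, rfl⟩
    | cons y tt ih =>
      intro m0
      rw [List.foldl_cons]
      obtain ⟨z, hz⟩ := Option.isSome_iff_exists.mp (hf m0 y)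
      rw [hz]
      exact ih z
  cases xs with
  | nil => exact absurd rfl hne
  | cons x t =>
    have hsome' : ∃ m, PySem.List.max? (x :: t) id = some m := by
      unfold PySem.List.max?
      rw [List.foldl_cons]
      exact aux _ (by intro a b; dsimp only; split <;> simp) t x
    obtain ⟨m, hsome⟩ := hsome'
    exact ⟨m, hsome, fun y hy => PySem.List.max?_isMax hsome y hy⟩

theorem pv_pairwise_lt_of_sorted_nodup (cuts : List Int) (hnd : cuts.Nodup) :
    (PySem.List.sorted cuts (fun q => q)).Pairwise (· < ·) := by
  have hperm : (PySem.List.sorted cuts (fun q => q)).Perm cuts :=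
    PySem.List.sorted_perm cuts (fun q => q) false
  have hle : (PySem.List.sorted cuts (fun q => q)).Pairwise (· ≤ ·) := by
    simpa using PySem.List.sorted_pairwise cuts (fun q => q)
  have hnds : (PySem.List.sorted cuts (fun q => q)).Nodup := hperm.nodup_iff.mpr hnd
  have := hle.and hnds
  exact this.imp (fun h => lt_of_le_of_ne h.1 h.2)

theorem pv_main_entry (c : Char) (hc : PySem.Chars.isspace c = false) (entry : List Char)
    (hce : c ∉ entry) (ends : List Int) (hE : ∀ e ∈ ends, 0 ≤ e ∧ e < entry.length)
    (M : Int) (hM : (ends.length : Int) ≤ M) :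
    PySem.Chars.splitOnMax
        (ends.foldl (fun e d => pvSpliceA [c] e (pvWalkA e d)) entry) [c] M =
      ((PySem.List.sorted
          (ends.foldl (fun cs d => PySem.Set.add cs (pvWalkB entry cs d)) PySem.Set.empty)
          (fun q => q)).foldl
        (fun (fp : List (List Char) × Int) cpos =>
          (fp.1 ++ [PySem.List.slice entry (some fp.2) (some cpos)], cpos + 1))
        ([], (0 : Int))).1 ++
      [PySem.List.slice entry
        (some ((PySem.List.sorted
          (ends.foldl (fun cs d => PySem.Set.add cs (pvWalkB entry cs d)) PySem.Set.empty)
          (fun q => q)).foldl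
          (fun (fp : List (List Char) × Int) cpos =>
            (fp.1 ++ [PySem.List.slice entry (some fp.2) (some cpos)], cpos + 1))
          ([], (0 : Int))).2) none] := by
  have hloop := pv_loop_eq c hc entry ends hE [] (by simp) List.nodup_nil
  set cuts := ends.foldl (fun cs d => PySem.Set.add cs (pvWalkB entry cs d)) [] with hcuts
  have hempty : (PySem.Set.empty : PySem.Set Int) = ([] : List Int) := rfl
  have hb := pv_cuts_bounds entry ends hE [] (by simp)
  have hnd := pv_cuts_nodup entry ends [] List.nodup_nil
  have hlen := pv_cuts_length entry ends []
  have hcz : entry.count c = 0 := List.count_eq_zero.mpr hce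
  have hstart : pvApply c entry [] = entry := rfl
  rw [hstart] at hloop
  rw [hempty, ← hcuts, hloop]
  have hcount : ((pvApply c entry cuts).count c : Int) ≤ M := by
    have h1 := pv_count_apply c entry cuts
    rw [← hcuts] at hlen
    simp only [List.length_nil, Nat.zero_add] at hlen
    omega
  rw [pv_splitOnMax_eq c _ M (by omega) hcount]
  have hperm : (PySem.List.sorted cuts (fun q => q)).Perm cuts :=
    PySem.List.sorted_perm cuts (fun q => q) false
  have hpw := pv_pairwise_lt_of_sorted_nodup cuts hnd
  have hbs : ∀ q ∈ PySem.List.sorted cuts (fun q => q), 0 ≤ q ∧ q < (entry.length : Int) :=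
    fun q hq => hb q (hperm.mem_iff.mp hq)
  rw [← pv_apply_perm c entry hperm, pv_splitOn_apply c _ entry hbs hpw hce]
  have hff := pv_fields_fold entry (PySem.List.sorted cuts (fun q => q)) [] 0 le_rfl
    (fun q hq => ⟨(hbs q hq).1, (hbs q hq).2⟩) hpw
  simp only [Int.toNat_zero, List.drop_zero, Int.sub_zero, List.nil_append] at hff
  rw [hff]

theorem pv_splitMax?_zero (s w : List Char) (hw : w ≠ []) :
    PySem.Chars.splitMax? s w 0 = some [s] := by
  rw [PySem.Chars.splitMax?, if_neg (by simpa [List.isEmpty_iff] using hw)]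
  congr 1
  rw [PySem.Chars.splitOnMax.eq_1, if_neg (by omega)]
  cases s <;> simp [PySem.Chars.splitOnMax.go]

theorem pv_foldl_id {α β : Type} (l : List β) (e : α) :
    List.foldl (fun e _ => e) e l = e := by
  induction l generalizing e with
  | nil => rfl
  | cons x t ih => simpa using ih e

-- ===== VERDICT (by name: the statement is the Claim_ definition above) =====
theorem sparse_table_parse_spec : Claim_equal_sparse_table_parse := by
  intro data delim _hdom hpre
  obtain ⟨hne, hdne, hsne, hdisj⟩ := hpre
  unfold Spec_sparse_table_parse
  obtain ⟨d0, dtail, rfl⟩ : ∃ d0 dtail, data = d0 :: dtail := by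
    cases data with
    | nil => exact absurd rfl hne
    | cons a b => exact ⟨a, b, rfl⟩
  obtain ⟨h0, htail, hsp0⟩ : ∃ h0 htail,
      PySem.Chars.split₀ (d0.toList) = h0 :: htail := by
    cases hs : PySem.Chars.split₀ (d0.toList) with
    | nil => exact absurd hs (by simpa using hsne)
    | cons a b => exact ⟨a, b, rfl⟩
  obtain ⟨m, hmax, hbound⟩ := pv_max?_spec
    (d0.toList.length :: (List.map String.toList dtail).map (fun x => x.length)) (by simp)
  have hspace' : PySem.Chars.isspace ' ' = true := by decide
  have hsp' : PySem.Chars.split₀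
      ((d0.toList ++ List.replicate (m - d0.toList.length) ' ') ++ [' ']) = h0 :: htail := by
    rw [List.append_assoc, pv_split₀_append_ws _ _ (by
      intro x hx
      rcases List.mem_append.mp hx with h | h
      · rw [List.eq_of_mem_replicate h]; exact hspace'
      · rw [List.mem_singleton.mp h]; exact hspace'), hsp0]
  rcases hdisj with hsingle | ⟨hdl1, hdlok, hhdr, hnodup⟩
  -- single-column header: no splicing happens and maxsplit is 0
  · have hs1 : (PySem.Chars.split₀ d0.toList).length = 1 := by simpa using hsingle
    rw [hsp0] at hs1
    simp only [List.length_cons] at hs1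
    have hhtail : htail = [] := List.eq_nil_of_length_eq_zero (by omega)
    subst hhtail
    have hdlne : delim.toList ≠ [] := by
      intro h
      apply hdne
      have := congrArg String.ofList h
      simpa using this
    have hsnil : PySem.List.sorted ([] : List Int) (fun q => q) = [] := rfl
    simp only [sparse_table_parse, sparse_table_parse_alt, List.map_cons, hmax, hsp']
    refine List.map_congr_left ?_
    intro entry _hentry
    simp [pv_foldl_id, pv_splitMax?_zero _ _ hdlne, hsnil,
      PySem.List.slice_zero_start, PySem.List.slice_none_none]
  -- multi-column header: delimiter is a single safe character
  · obtain ⟨c, hdelim⟩ : ∃ c, delim.toList = [c] := by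
      cases hdl : delim.toList with
      | nil => rw [hdl] at hdl1; simp at hdl1
      | cons c rest =>
        rw [hdl] at hdl1
        simp only [List.length_cons] at hdl1
        have : rest = [] := List.eq_nil_of_length_eq_zero (by omega)
        exact ⟨c, by rw [this]⟩
    rw [hdelim] at hdlok
    simp only [List.all_cons, List.all_nil, Bool.and_true, Bool.and_eq_true] at hdlok
    have hcspace : PySem.Chars.isspace c = false := by
      have := hdlok.1
      revert this
      cases PySem.Chars.isspace c <;> simp
    have hcnot : ∀ l ∈ dtail, c ∉ l.toList := by
      intro l hl
      have h1 := hdlok.2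
      rw [List.all_eq_true] at h1
      have := h1 l (by simpa using hl)
      simpa using this
    simp only [sparse_table_parse, sparse_table_parse_alt, List.map_cons, hmax, hdelim, hsp']
    refine List.map_congr_left ?_
    intro entry hentry
    -- facts about entry
    obtain ⟨sl, hsl, rfl⟩ : ∃ sl, sl ∈ List.map String.toList dtail ∧
        entry = sl ++ List.replicate (m - sl.length) ' ' := by
      obtain ⟨sl, hsl, rfl⟩ := List.mem_map.mp hentry
      exact ⟨sl, hsl, rfl⟩
    set entry := sl ++ List.replicate (m - sl.length) ' ' with hentrydef
    have hce : c ∉ entry := by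
      intro hmem
      rcases List.mem_append.mp hmem with h | h
      · obtain ⟨t, ht0, rfl⟩ := List.mem_map.mp hsl
        exact hcnot t ht0 h
      · have := List.eq_of_mem_replicate h
        rw [this] at hcspace
        rw [hspace'] at hcspace
        cases hcspace
    have hsllen : sl.length ≤ m := by
      refine hbound sl.length ?_
      exact List.mem_cons_of_mem _ (List.mem_map.mpr ⟨sl, hsl, rfl⟩)
    have hlen_entry : entry.length = m := by
      rw [hentrydef]
      simp only [List.length_append, List.length_replicate]
      omega
    have hd0len : d0.toList.length ≤ m := hbound _ (by simp)
    -- header/token facts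
    have hph_chars : ∀ ch ∈ d0.toList ++ List.replicate (m - d0.toList.length) ' ',
        ch = ' ' ∨ PySem.Chars.isspace ch = false := by
      intro ch hch
      rcases List.mem_append.mp hch with h | h
      · have h2 : (ch == ' ' || !PySem.Chars.isspace ch) = true := by
          rw [List.all_eq_true] at hhdr
          exact hhdr ch (by simpa using h)
        rcases Bool.or_eq_true_iff.mp h2 with h3 | h3
        · exact Or.inl (by simpa using h3)
        · exact Or.inr (by simpa using h3)
      · exact Or.inl (List.eq_of_mem_replicate h)
    have hph_split : PySem.Chars.split₀ (d0.toList ++ List.replicate (m - d0.toList.length) ' ') =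
        h0 :: htail := by
      rw [pv_split₀_append_ws _ _ (fun x hx => by
        rw [List.eq_of_mem_replicate hx]; exact hspace'), hsp0]
    have hph_len : (d0.toList ++ List.replicate (m - d0.toList.length) ' ').length = m := by
      simp only [List.length_append, List.length_replicate]
      omega
    have hEnds : ∀ h ∈ htail,
        0 ≤ PySem.Chars.find (d0.toList ++ List.replicate (m - d0.toList.length) ' ' ++ [' '])
          (' ' :: h ++ [' ']) ∧
        PySem.Chars.find (d0.toList ++ List.replicate (m - d0.toList.length) ' ' ++ [' '])
          (' ' :: h ++ [' ']) < (entry.length : Int) := by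
      intro h hh
      have hinf : (' ' :: (h ++ [' '])) <:+:
          ((d0.toList ++ List.replicate (m - d0.toList.length) ' ') ++ [' ']) := by
        refine pv_token_infix _ hph_chars h ?_
        rw [hph_split]
        simpa using hh
      have hfind0 : 0 ≤ PySem.Chars.find
          ((d0.toList ++ List.replicate (m - d0.toList.length) ' ') ++ [' '])
          (' ' :: h ++ [' ']) := by
        rw [PySem.Chars.find_nonneg_iff]
        exact hinf
      refine ⟨hfind0, ?_⟩
      have hpre := (PySem.Chars.find_spec hfind0).1
      have hlenle := hpre.length_le
      have hhne : h ≠ [] := by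
        refine pv_token_ne_nil d0.toList h ?_
        rw [hsp0]
        exact List.mem_cons_of_mem _ hh
      have hhlen : 1 ≤ h.length := by
        cases h with
        | nil => exact absurd rfl hhne
        | cons a b => simp
      rw [hlen_entry]
      simp only [List.length_drop, List.length_cons, List.length_append,
        List.length_singleton, hph_len] at hlenle ⊢
      omega
    -- abbreviations
    set ht := d0.toList ++ List.replicate (m - d0.toList.length) ' ' ++ [' '] with hhtdef
    set es := List.map (fun h => PySem.Chars.find ht (' ' :: h ++ [' '])) htail with hesdef
    have hnodup' : (h0 :: htail).Nodup := by
      rw [← hsp0]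
      simpa using hnodup
    set ns := (h0 :: htail).dropLast with hnsdef
    have hlastmem : h0 :: htail ≠ [] := by simp
    set lastEl := (h0 :: htail).getLast hlastmem with hlastdef
    have hsplitlast : h0 :: htail = ns ++ [lastEl] := (List.dropLast_append_getLast hlastmem).symm
    have hndns : ns.Nodup ∧ lastEl ∉ ns := by
      rw [hsplitlast] at hnodup'
      obtain ⟨h1, _, h3⟩ := List.nodup_append.mp hnodup'
      refine ⟨h1, fun hmem => ?_⟩
      exact h3 lastEl hmem lastEl (by simp) rfl
    have hnslen : ns.length = htail.length := by
      rw [hnsdef]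
      simp
    have heslen : es.length = htail.length := by rw [hesdef]; simp
    -- specs = ns.zip es
    have htake : List.take ((h0 :: htail).length - 1) (h0 :: htail) = ns := by
      rw [hnsdef, List.dropLast_eq_take]
    have hdrop1 : List.drop 1 ([h0] ++ List.map (fun h => ' ' :: h ++ [' ']) htail) =
        List.map (fun h => ' ' :: h ++ [' ']) htail := by simp
    have hes2 : es = List.map (PySem.Chars.find ht)
        (List.map (fun h => ' ' :: h ++ [' ']) htail) := by
      rw [List.map_map]
      rfl
    have hspecs : (List.map
        (fun p => (p.1, PySem.Chars.find ht p.2))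
        ((List.take ((h0 :: htail).length - 1) (h0 :: htail)).zip
          (List.drop 1 ([h0] ++ List.map (fun h => ' ' :: h ++ [' ']) htail)))) = ns.zip es := by
      rw [htake, hdrop1, hes2]
      simp only [List.zip_map_right, List.map_map]
      exact List.map_congr_left (fun p _ => by cases p with | mk a b => rfl)
    have hnszip : ∀ sp ∈ ns.zip es, sp.1 ∈ ns := fun sp hsp => (List.of_mem_zip hsp).1
    -- A's outer loop = fold of splice/walk over es.reverse
    have houter : (h0 :: htail).reverse.foldl
        (fun e col => (List.map (fun p => (p.1, PySem.Chars.find ht p.2))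
          ((List.take ((h0 :: htail).length - 1) (h0 :: htail)).zip
            (List.drop 1 ([h0] ++ List.map (fun h => ' ' :: h ++ [' ']) htail)))).foldl
          (fun e sp => if sp.1 = col then pvSpliceA [c] e (pvWalkA e sp.2) else e) e) entry =
        es.reverse.foldl (fun e d => pvSpliceA [c] e (pvWalkA e d)) entry := by
      rw [hspecs]
      conv_lhs => rw [hsplitlast]
      rw [List.reverse_append, List.reverse_singleton, List.singleton_append, List.foldl_cons]
      rw [pv_inner_none (fun e d => pvSpliceA [c] e (pvWalkA e d)) (ns.zip es) lastEl
        (fun sp hsp h => hndns.2 (by rw [← h]; exact hnszip sp hsp)) entry]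
      have hpo := pv_outer_fold (fun e d => pvSpliceA [c] e (pvWalkA e d)) ns es [] entry
        hndns.1 (by rw [hnslen, heslen]) (by simp)
      simpa using hpo
    -- the ends list for pv_main_entry
    have hEnds' : ∀ e ∈ es.reverse, 0 ≤ e ∧ e < (entry.length : Int) := by
      intro e he
      rw [List.mem_reverse, hesdef] at he
      obtain ⟨h, hh, rfl⟩ := List.mem_map.mp he
      exact hEnds h hh
    have hMlen : ((es.reverse.length : Nat) : Int) ≤ (((h0 :: htail).length : Nat) : Int) - 1 := by
      simp only [List.length_reverse, heslen, List.length_cons]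
      push_cast
      omega
    have hmain := pv_main_entry c hcspace entry hce es.reverse hEnds'
      ((((h0 :: htail).length : Nat) : Int) - 1) hMlen
    rw [houter]
    have hsm : PySem.Chars.splitMax?
        (es.reverse.foldl (fun e d => pvSpliceA [c] e (pvWalkA e d)) entry) [c]
        ((((h0 :: htail).length : Nat) : Int) - 1) =
        some (PySem.Chars.splitOnMax
          (es.reverse.foldl (fun e d => pvSpliceA [c] e (pvWalkA e d)) entry) [c]
          ((((h0 :: htail).length : Nat) : Int) - 1)) := by
      simp [PySem.Chars.splitMax?]
    rw [hsm, Option.getD_some, hmain, List.singleton_append, List.zip_map_right, List.foldl_map]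
    rfl
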